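-- pv_equiv track=rewrite | github.com/Vexiona/metrical-viewer | src/iamb.py | element_to_syllable
-- ===== SOURCE A (Python) =====
-- ELEMENT_SYLS = {
--     'I': [1, 1], 'S': [1, 1], 'P': [1, 1],
--     'A': [2, 1],  # anapest: resolved thesis (uu) + arsis (-)
--     'b': [1, 2],  # tribrach: thesis (u) + resolved arsis (uu)
--     'C': [1, 2],  # cretic: thesis (-) + resolved arsis (u-)
--     'B': [2, 1],  # antibacchius: resolved thesis (--) + arsis (u)
-- }
--
-- def element_to_syllable(scheme, element):
--     """Convert 1-based element (half-foot) position to 1-based syllable position."""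
--     syl_pos = 0
--     el_count = 0
--     for code in scheme:
--         for el_syls in ELEMENT_SYLS.get(code, [1, 1]):
--             el_count += 1
--             syl_pos += el_syls
--             if el_count == element:
--                 return syl_pos
--     return element  # fallback
-- ===== SOURCE B (Python) =====
-- ELEMENT_SYLS = {
--     'I': [1, 1], 'S': [1, 1], 'P': [1, 1],
--     'A': [2, 1],  # anapest: resolved thesis (uu) + arsis (-)
--     'b': [1, 2],  # tribrach: thesis (u) + resolved arsis (uu)
--     'C': [1, 2],  # cretic: thesis (-) + resolved arsis (u-)
--     'B': [2, 1],  # antibacchius: resolved thesis (--) + arsis (u)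
-- }
--
-- def element_to_syllable(scheme, element):
--     """Convert 1-based element (half-foot) position to 1-based syllable position."""
--     if element < 1 or element > 2 * len(scheme):
--         return element  # fallback
--     q, r = divmod(element, 2)
--     pos = sum(sum(ELEMENT_SYLS.get(c, [1, 1])) for c in scheme[:q])
--     if r:
--         pos += ELEMENT_SYLS.get(scheme[q], [1, 1])[0]
--     return pos
-- ===== Notes on version B (the rewrite author's own statement) =====
-- stated objective: alternative
-- what changed: A scans element-by-element with a fused running sum and early return; B locates the target foot arithmetically with divmod(element, 2), sums whole two-element feet over scheme[:q] in one pass, and adds the first half-foot when the position is odd.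
import Mathlib
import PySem

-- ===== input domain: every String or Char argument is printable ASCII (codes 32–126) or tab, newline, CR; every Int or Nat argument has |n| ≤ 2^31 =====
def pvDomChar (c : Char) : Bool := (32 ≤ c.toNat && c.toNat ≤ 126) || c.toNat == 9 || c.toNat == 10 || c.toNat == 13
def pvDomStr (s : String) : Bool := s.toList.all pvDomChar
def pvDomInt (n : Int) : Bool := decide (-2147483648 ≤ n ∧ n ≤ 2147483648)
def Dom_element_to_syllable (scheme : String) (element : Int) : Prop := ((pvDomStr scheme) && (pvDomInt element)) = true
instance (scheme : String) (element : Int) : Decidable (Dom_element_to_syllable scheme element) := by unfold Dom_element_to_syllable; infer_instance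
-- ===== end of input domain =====

-- B replaces A's fused early-exit running-sum scan over all elements by index arithmetic:
-- divmod(element, 2) locates the foot, one pass sums whole feet before it (objective: alternative).

-- ===== PORT A =====
-- ELEMENT_SYLS.get(code, [1, 1])
def elementSyls (c : Char) : List Int :=
  if c = 'I' then [1, 1]
  else if c = 'S' then [1, 1]
  else if c = 'P' then [1, 1]
  else if c = 'A' then [2, 1]
  else if c = 'b' then [1, 2]
  else if c = 'C' then [1, 2]
  else if c = 'B' then [2, 1]
  else [1, 1]

-- inner 'for el_syls in ELEMENT_SYLS.get(code, [1, 1])' loop: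
-- returns the updated (el_count, syl_pos) state, or an early return value
def aInner : List Int → Int → Int → Int → (Int × Int) × Option Int
  | [], elCount, sylPos, _ => ((elCount, sylPos), none)
  | s :: rest, elCount, sylPos, element =>
    if elCount + 1 = element then ((elCount + 1, sylPos + s), some (sylPos + s))
    else aInner rest (elCount + 1) (sylPos + s) element

-- outer 'for code in scheme' loop
def aOuter : List Char → Int → Int → Int → Int
  | [], _, _, element => element
  | c :: rest, elCount, sylPos, element =>
    match aInner (elementSyls c) elCount sylPos element with
    | (_, some r) => r
    | ((ec, sp), none) => aOuter rest ec sp element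

def element_to_syllable (scheme : String) (element : Int) : Int :=
  aOuter scheme.toList 0 0 element

-- ===== PORT B =====
-- sum(ELEMENT_SYLS.get(c, [1, 1]))
def pairSum (c : Char) : Int := (elementSyls c).foldl (· + ·) 0

def element_to_syllable_alt (scheme : String) (element : Int) : Int :=
  let cs := scheme.toList
  if element < 1 ∨ 2 * (cs.length : Int) < element then element
  else
    let q := PySem.Int.floordiv element 2
    let r := PySem.Int.mod element 2
    -- sum(sum(ELEMENT_SYLS.get(c, [1, 1])) for c in scheme[:q])
    let pos := (PySem.List.slice cs none (some q)).foldl (fun acc c => acc + pairSum c) 0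
    if r ≠ 0 then
      -- scheme[q] is in range here (element odd and ≤ 2*len forces q < len);
      -- [0] on the two-element literal list is exactly .headD 0 (the list is never empty)
      pos + (elementSyls (PySem.List.pyGetD cs q ' ')).headD 0
    else pos

-- ===== PRECONDITION & SPEC =====
def Spec_element_to_syllable (scheme : String) (element : Int) (out : Int) : Prop := out = element_to_syllable_alt scheme element
instance (scheme : String) (element : Int) (out : Int) : Decidable (Spec_element_to_syllable scheme element out) := by unfold Spec_element_to_syllable; infer_instance

-- ===== CLAIM (what is proved, stated in full; the proofs are below) =====
def Claim_equal_element_to_syllable : Prop := ∀ (scheme : String) (element : Int), Dom_element_to_syllable scheme element → Spec_element_to_syllable scheme element (element_to_syllable scheme element)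

-- ===== LEMMAS AND PROOFS =====
def syl1 (c : Char) : Int := (elementSyls c).headD 0
def syl2 (c : Char) : Int := (elementSyls c).getD 1 0

lemma elementSyls_eq (c : Char) : elementSyls c = [syl1 c, syl2 c] := by
  unfold syl1 syl2 elementSyls; split_ifs <;> rfl

lemma pairSum_eq (c : Char) : pairSum c = syl1 c + syl2 c := by
  rw [pairSum, elementSyls_eq]; simp [List.foldl]

-- common characterisation of position 'e' (1-based) inside 'cs'
def bGo : List Char → Int → Int
  | [], e => e
  | c :: rest, e =>
    if e = 1 then syl1 c
    else if e = 2 then syl1 c + syl2 c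
    else pairSum c + bGo rest (e - 2)

lemma aOuter_eq : ∀ (codes : List Char) (ec sp element : Int),
    aOuter codes ec sp element =
      if ec < element ∧ element ≤ ec + 2 * (codes.length : Int)
      then sp + bGo codes (element - ec) else element := by
  intro codes
  induction codes with
  | nil =>
    intro ec sp element
    rw [if_neg]
    · rfl
    · intro hcon
      have hA := hcon.1
      have hB := hcon.2
      simp at hB
      omega
  | cons c rest ih =>
    intro ec sp element
    have hlen : (0:Int) ≤ (rest.length : Int) := by positivity
    show (match aInner (elementSyls c) ec sp element with
          | (_, some r) => r
          | ((ec', sp'), none) => aOuter rest ec' sp' element) =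
      if ec < element ∧ element ≤ ec + 2 * (((c :: rest).length : Int))
      then sp + bGo (c :: rest) (element - ec) else element
    rw [elementSyls_eq]
    by_cases h1 : ec + 1 = element
    · have he : element - ec = 1 := by omega
      have stepA : (match aInner [syl1 c, syl2 c] ec sp element with
          | (_, some r) => r
          | ((ec', sp'), none) => aOuter rest ec' sp' element) = sp + syl1 c := by
        simp [aInner, h1]
      have hb : bGo (c :: rest) 1 = syl1 c := by simp [bGo]
      rw [stepA, if_pos ⟨by omega, by simp; omega⟩, he, hb]
    · by_cases h2 : ec + 1 + 1 = element
      · have he : element - ec = 2 := by omega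
        have stepA : (match aInner [syl1 c, syl2 c] ec sp element with
            | (_, some r) => r
            | ((ec', sp'), none) => aOuter rest ec' sp' element) = sp + syl1 c + syl2 c := by
          simp [aInner, h1, h2]
        have hb : bGo (c :: rest) 2 = syl1 c + syl2 c := by simp [bGo]
        rw [stepA, if_pos ⟨by omega, by simp; omega⟩, he, hb]
        ring
      · have stepA : (match aInner [syl1 c, syl2 c] ec sp element with
            | (_, some r) => r
            | ((ec', sp'), none) => aOuter rest ec' sp' element)
            = aOuter rest (ec + 1 + 1) (sp + syl1 c + syl2 c) element := by
          simp [aInner, h1, h2]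
        rw [stepA, ih]
        have hne1 : element - ec ≠ 1 := by omega
        have hne2 : element - ec ≠ 2 := by omega
        have hgo : bGo (c :: rest) (element - ec) = pairSum c + bGo rest (element - ec - 2) := by
          simp [bGo, hne1, hne2]
        by_cases hc : ec + 1 + 1 < element ∧ element ≤ ec + 1 + 1 + 2 * (rest.length : Int)
        · rw [if_pos hc, if_pos ⟨by omega, by simp; omega⟩, hgo, pairSum_eq]
          have h3 : element - (ec + 1 + 1) = element - ec - 2 := by omega
          rw [h3]; ring
        · rw [if_neg hc, if_neg]
          intro hcon
          apply hc
          have hA := hcon.1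
          have hB := hcon.2
          simp at hB
          exact ⟨by omega, by omega⟩

lemma foldl_pair_shift : ∀ (l : List Char) (i : Int),
    l.foldl (fun acc c => acc + pairSum c) i = i + l.foldl (fun acc c => acc + pairSum c) 0 := by
  intro l
  induction l with
  | nil => intro i; simp
  | cons c rest ih =>
    intro i
    simp only [List.foldl_cons]
    rw [ih (i + pairSum c), ih (0 + pairSum c)]
    ring

lemma bClosed : ∀ (cs : List Char) (element : Int), 1 ≤ element → element ≤ 2 * (cs.length : Int) →
    (if PySem.Int.mod element 2 ≠ 0 then
       (PySem.List.slice cs none (some (PySem.Int.floordiv element 2))).foldl (fun acc c => acc + pairSum c) 0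
         + (elementSyls (PySem.List.pyGetD cs (PySem.Int.floordiv element 2) ' ')).headD 0
     else (PySem.List.slice cs none (some (PySem.Int.floordiv element 2))).foldl (fun acc c => acc + pairSum c) 0)
    = bGo cs element := by
  intro cs
  induction cs with
  | nil => intro element h1 h2; simp at h2; omega
  | cons c rest ih =>
    intro element h1 h2
    have h2' : element ≤ 2 * ((rest.length : Int) + 1) := by simp at h2; omega
    have hd : PySem.Int.floordiv element 2 = element / 2 :=
      PySem.Int.floordiv_eq_ediv_of_pos (by norm_num)
    have hm : PySem.Int.mod element 2 = element % 2 :=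
      PySem.Int.mod_eq_emod_of_pos (by norm_num)
    have hq0 : 0 ≤ element / 2 := by omega
    rw [hd, hm, PySem.List.slice_to _ hq0]
    by_cases he1 : element = 1
    · subst he1
      norm_num
      simp [bGo, syl1]
    · by_cases he2 : element = 2
      · subst he2
        norm_num
        simp [bGo, pairSum_eq]
      · -- element ≥ 3: peel one foot and recurse
        have h3 : 3 ≤ element := by omega
        have hlen : (rest.length : Int) ≥ 1 := by omega
        have hq1 : 1 ≤ element / 2 := by omega
        have htn : (element / 2).toNat = ((element - 2) / 2).toNat + 1 := by omega
        have hmod : element % 2 = (element - 2) % 2 := by omega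
        rw [htn, List.take_succ_cons, hmod]
        have hrec := ih (element - 2) (by omega) (by omega)
        rw [PySem.Int.floordiv_eq_ediv_of_pos (a := element - 2) (by norm_num),
            PySem.Int.mod_eq_emod_of_pos (a := element - 2) (by norm_num),
            PySem.List.slice_to _ (by omega : (0:Int) ≤ (element - 2) / 2)] at hrec
        have hgo : bGo (c :: rest) element = pairSum c + bGo rest (element - 2) := by
          simp [bGo, he1, he2]
        rw [hgo, ← hrec]
        by_cases hr : (element - 2) % 2 ≠ 0
        · rw [if_pos hr, if_pos hr]
          have hodd : element % 2 = 1 := by omega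
          have hgd : PySem.List.pyGetD (c :: rest) (element / 2) ' '
              = PySem.List.pyGetD rest ((element - 2) / 2) ' ' := by
            rw [PySem.List.pyGetD_eq_getElem _ _ (by omega) (by simp; omega),
                PySem.List.pyGetD_eq_getElem _ _ (by omega) (by omega)]
            simp [htn]
          rw [hgd, List.foldl_cons, foldl_pair_shift]
          ring
        · rw [if_neg hr, if_neg hr, List.foldl_cons, foldl_pair_shift]
          ring

lemma alt_eq (scheme : String) (element : Int) :
    element_to_syllable_alt scheme element =
      if 1 ≤ element ∧ element ≤ 2 * (scheme.toList.length : Int)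
      then bGo scheme.toList element else element := by
  by_cases h : element < 1 ∨ 2 * ((scheme.toList.length : Int)) < element
  · rw [if_neg (by omega)]
    simp only [element_to_syllable_alt]
    rw [if_pos h]
  · push Not at h
    rw [if_pos h]
    have hb := bClosed scheme.toList element (by omega) (by omega)
    simp only [element_to_syllable_alt]
    rw [if_neg (by omega)]
    exact hb

-- ===== VERDICT (by name: the statement is the Claim_ definition above) =====
theorem element_to_syllable_spec : Claim_equal_element_to_syllable := by
  intro scheme element _
  unfold Spec_element_to_syllable
  rw [element_to_syllable, aOuter_eq, alt_eq]
  by_cases h : 1 ≤ element ∧ element ≤ 2 * (scheme.toList.length : Int)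
  · rw [if_pos h, if_pos (by omega)]
    simp
  · rw [if_neg h, if_neg (by omega)]
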